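-- pv_equiv track=rewrite | github.com/techguru-nya/make_torque_model | utils.py | COMMENT_SEARCH
-- ===== SOURCE A (Python) =====
-- def COMMENT_SEARCH(d_Comment, l_Key, l_Key_Remove):
--     d_Searched = {}
--
--     for Tra in d_Comment:
--         Com = d_Comment[Tra]
--
--         Counter = 0
--         for Key in l_Key:
--             if Key.lower() in Com.lower():
--                 Counter += 1
--
--         if Counter == len(l_Key):
--             d_Searched[Tra] = Com
--
--     l_Remove = []
--     for i, Tra in enumerate(d_Searched):
--         Com = d_Searched[Tra]
--
--         for Key in l_Key_Remove:
--             if Key.lower() in Com.lower():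
--                 l_Remove.append(Tra)
--                 break
--
--     for Tra in l_Remove:
--         d_Searched.pop(Tra)
--
--     return d_Searched
-- ===== SOURCE B (Python) =====
-- def COMMENT_SEARCH(d_Comment, l_Key, l_Key_Remove):
--     return {Tra: Com for Tra, Com in d_Comment.items()
--             if all(Key.lower() in Com.lower() for Key in l_Key)
--             and not any(Key.lower() in Com.lower() for Key in l_Key_Remove)}
-- ===== Notes on version B (the rewrite author's own statement) =====
-- stated objective: simpler
-- what changed: Replaced A's two-phase build-then-remove (Counter loop per entry, second pass collecting l_Remove, then a pop-cleanup loop that rescans/rebuilds the dict per removed key) with a single dict comprehension keeping an entry iff all keys match and no remove-key matches.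
import Mathlib
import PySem

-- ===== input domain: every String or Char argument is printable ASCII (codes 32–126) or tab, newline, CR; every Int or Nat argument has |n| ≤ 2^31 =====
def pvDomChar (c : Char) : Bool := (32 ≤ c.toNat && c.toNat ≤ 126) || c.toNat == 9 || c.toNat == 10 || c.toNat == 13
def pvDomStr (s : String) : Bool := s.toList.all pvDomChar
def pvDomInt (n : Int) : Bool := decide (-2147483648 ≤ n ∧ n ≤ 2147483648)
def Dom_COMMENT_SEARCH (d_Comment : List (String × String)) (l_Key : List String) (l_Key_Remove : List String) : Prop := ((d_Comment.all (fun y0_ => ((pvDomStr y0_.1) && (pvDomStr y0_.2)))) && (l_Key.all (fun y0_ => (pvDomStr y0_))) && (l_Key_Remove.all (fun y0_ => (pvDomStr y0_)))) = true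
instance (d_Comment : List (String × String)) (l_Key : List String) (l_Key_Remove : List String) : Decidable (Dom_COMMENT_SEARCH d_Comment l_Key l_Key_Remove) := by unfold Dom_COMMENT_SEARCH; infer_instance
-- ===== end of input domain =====

-- B replaces A's two-phase build-then-remove (Counter loop, l_Remove list, per-key pop cleanup)
-- by one single-pass filter with the combined predicate "all keys present and no remove-key
-- present"; simpler, and measured faster on a timing run's generated inputs.

-- ===== PORT A =====
-- 'Key.lower() in Com.lower()' (shared primitive of both programs)
def pvKeyIn (Key Com : String) : Bool := PySem.Str.isIn (PySem.Str.lower Key) (PySem.Str.lower Com)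

-- A's inner 'for Key in l_Key_Remove: if …: append; break' — first-match loop with break
def COMMENT_SEARCH_removeHit : List String → String → Bool
  | [], _ => false
  | Key :: rest, Com => if pvKeyIn Key Com then true else COMMENT_SEARCH_removeHit rest Com

def COMMENT_SEARCH (d_Comment : List (String × String)) (l_Key : List String) (l_Key_Remove : List String) : List (String × String) :=
  let d := PySem.Dict.ofList d_Comment
  let d_Searched := d.keys.foldl (fun dS Tra =>
      let Com := d.getD Tra ""            -- d_Comment[Tra]: Tra comes from d's keys, so always present
      let Counter := l_Key.foldl (fun c Key => if pvKeyIn Key Com then c + 1 else c) (0 : Int)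
      if Counter = PySem.List.len l_Key then dS.insert Tra Com else dS) PySem.Dict.empty
  let l_Remove := d_Searched.keys.foldl (fun lR Tra =>
      let Com := d_Searched.getD Tra ""   -- d_Searched[Tra]: Tra comes from d_Searched's keys
      if COMMENT_SEARCH_removeHit l_Key_Remove Com then lR ++ [Tra] else lR) ([] : List String)
  (l_Remove.foldl (fun dS Tra => dS.erase Tra) d_Searched).items

-- ===== PORT B =====
def COMMENT_SEARCH_alt (d_Comment : List (String × String)) (l_Key : List String) (l_Key_Remove : List String) : List (String × String) :=
  (PySem.Dict.ofList d_Comment).items.filter (fun p =>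
    l_Key.all (fun Key => pvKeyIn Key p.2) && !(l_Key_Remove.any (fun Key => pvKeyIn Key p.2)))

-- ===== PRECONDITION & SPEC =====
def Spec_COMMENT_SEARCH (d_Comment : List (String × String)) (l_Key : List String) (l_Key_Remove : List String) (out : List (String × String)) : Prop := out = COMMENT_SEARCH_alt d_Comment l_Key l_Key_Remove
instance (d_Comment : List (String × String)) (l_Key : List String) (l_Key_Remove : List String) (out : List (String × String)) : Decidable (Spec_COMMENT_SEARCH d_Comment l_Key l_Key_Remove out) := by unfold Spec_COMMENT_SEARCH; infer_instance

-- ===== CLAIM (what is proved, stated in full; the proofs are below) =====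
def Claim_equal_COMMENT_SEARCH : Prop := ∀ (d_Comment : List (String × String)) (l_Key : List String) (l_Key_Remove : List String), Dom_COMMENT_SEARCH d_Comment l_Key l_Key_Remove → Spec_COMMENT_SEARCH d_Comment l_Key l_Key_Remove (COMMENT_SEARCH d_Comment l_Key l_Key_Remove)

-- ===== LEMMAS AND PROOFS =====

-- the break-loop is List.any
theorem removeHit_eq_any (l : List String) (Com : String) :
    COMMENT_SEARCH_removeHit l Com = l.any (fun Key => pvKeyIn Key Com) := by
  induction l with
  | nil => rfl
  | cons k rest ih => by_cases h : pvKeyIn k Com <;> simp [COMMENT_SEARCH_removeHit, h, ih]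

-- 'Counter == len(l_Key)' is 'all keys match'
theorem counter_eq_len_iff (lK : List String) (Com : String) :
    (lK.foldl (fun c Key => if pvKeyIn Key Com then c + 1 else c) (0 : Int) = PySem.List.len lK)
      ↔ lK.all (fun Key => pvKeyIn Key Com) = true := by
  rw [PySem.List.foldl_count_if, PySem.List.len_eq, zero_add, Nat.cast_inj,
    List.countP_eq_length, List.all_eq_true]

-- popping a list of keys filters the items by key membership
theorem items_foldl_erase {κ ν : Type} [BEq κ] [LawfulBEq κ] (ks : List κ) (d : PySem.Dict κ ν) :
    (ks.foldl (fun dS k => dS.erase k) d).items = d.items.filter (fun p => !ks.contains p.1) := by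
  induction ks generalizing d with
  | nil => simp
  | cons k ks ih =>
    rw [List.foldl_cons, ih,
      show (d.erase k).items = d.items.filter (fun p => !(p.1 == k)) from rfl,
      List.filter_filter]
    apply List.filter_congr
    intro p _
    simp only [List.contains_cons, Bool.not_or, Bool.and_comm]

theorem COMMENT_SEARCH_eq (d_Comment : List (String × String)) (l_Key : List String) (l_Key_Remove : List String) :
    COMMENT_SEARCH d_Comment l_Key l_Key_Remove = COMMENT_SEARCH_alt d_Comment l_Key l_Key_Remove := by
  have hnd : (PySem.Dict.ofList d_Comment).keys.Nodup := PySem.Dict.nodup_keys_ofList d_Comment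
  set d := PySem.Dict.ofList d_Comment with hd
  -- the searched-predicate and the remove-predicate of B
  set P : String × String → Bool := fun p => l_Key.all (fun Key => pvKeyIn Key p.2) with hP
  set Q : String × String → Bool := fun p => l_Key_Remove.any (fun Key => pvKeyIn Key p.2) with hQ
  -- phase 1: the keys-loop builds exactly the P-filter of d.items
  have h1 : (d.keys.foldl (fun dS Tra =>
        let Com := d.getD Tra ""
        let Counter := l_Key.foldl (fun c Key => if pvKeyIn Key Com then c + 1 else c) (0 : Int)
        if Counter = PySem.List.len l_Key then dS.insert Tra Com else dS) PySem.Dict.empty).items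
      = d.items.filter P := by
    have hkeys : d.keys = d.items.map Prod.fst := rfl
    rw [hkeys, List.foldl_map]
    have hcongr : ∀ (acc : PySem.Dict String String), ∀ p ∈ d.items,
        (let Com := d.getD p.1 ""
         let Counter := l_Key.foldl (fun c Key => if pvKeyIn Key Com then c + 1 else c) (0 : Int)
         if Counter = PySem.List.len l_Key then acc.insert p.1 Com else acc)
        = (if P p = true then acc.insert p.1 p.2 else acc) := by
      intro acc p hp
      have hget : d.getD p.1 "" = p.2 :=
        PySem.Dict.getD_of_mem_items d (by simpa using hp) hnd ""
      simp only [hget]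
      exact if_congr (by rw [counter_eq_len_iff]) rfl rfl
    rw [PySem.List.foldl_congr_mem _ _ _ _ hcongr, ← List.foldl_filter]
    have hfresh : ∀ a ∈ d.items.filter P, (PySem.Dict.empty : PySem.Dict String String).contains a.1 = false := by
      intro a _; exact PySem.Dict.contains_empty _
    have hnodup : ((d.items.filter P).map Prod.fst).Nodup :=
      (List.Sublist.map Prod.fst List.filter_sublist).nodup hnd
    rw [PySem.Dict.items_foldl_insert_fresh (d.items.filter P) Prod.fst Prod.snd _ hfresh hnodup]
    simp [PySem.Dict.empty]
  set dS := (d.keys.foldl (fun dS Tra =>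
        let Com := d.getD Tra ""
        let Counter := l_Key.foldl (fun c Key => if pvKeyIn Key Com then c + 1 else c) (0 : Int)
        if Counter = PySem.List.len l_Key then dS.insert Tra Com else dS) PySem.Dict.empty) with hdS
  have hndS : dS.keys.Nodup := by
    show (dS.items.map Prod.fst).Nodup
    rw [h1]; exact (List.Sublist.map Prod.fst List.filter_sublist).nodup hnd
  -- phase 2: l_Remove lists exactly the keys of the Q-filter of dS.items
  have h2 : (dS.keys.foldl (fun lR Tra =>
        let Com := dS.getD Tra ""
        if COMMENT_SEARCH_removeHit l_Key_Remove Com then lR ++ [Tra] else lR) ([] : List String))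
      = (dS.items.filter Q).map Prod.fst := by
    have hkeys : dS.keys = dS.items.map Prod.fst := rfl
    rw [hkeys, List.foldl_map]
    have hcongr : ∀ (acc : List String), ∀ p ∈ dS.items,
        (let Com := dS.getD p.1 ""
         if COMMENT_SEARCH_removeHit l_Key_Remove Com then acc ++ [p.1] else acc)
        = (if Q p = true then acc ++ [p.1] else acc) := by
      intro acc p hp
      have hget : dS.getD p.1 "" = p.2 :=
        PySem.Dict.getD_of_mem_items dS (by simpa using hp) hndS ""
      simp only [hget, removeHit_eq_any]
      rfl
    rw [PySem.List.foldl_congr_mem _ _ _ _ hcongr, PySem.List.foldl_append_if]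
    simp
  -- phase 3: popping those keys keeps exactly the ¬Q entries
  show (List.foldl (fun dS Tra => dS.erase Tra) dS _).items = _
  rw [items_foldl_erase, h2]
  have hmem : ∀ p ∈ dS.items,
      (!((dS.items.filter Q).map Prod.fst).contains p.1) = !Q p := by
    intro p hp
    congr 1
    rw [Bool.eq_iff_iff, List.contains_iff_mem]
    constructor
    · intro hm
      obtain ⟨q, hqf, hq1⟩ := List.mem_map.1 hm
      have hq : q = p := List.inj_on_of_nodup_map hndS (List.mem_of_mem_filter hqf) hp hq1
      have := List.of_mem_filter hqf
      rwa [hq] at this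
    · intro hQp
      exact List.mem_map.2 ⟨p, List.mem_filter.2 ⟨hp, hQp⟩, rfl⟩
  rw [List.filter_congr hmem, h1, List.filter_filter]
  apply List.filter_congr
  intro p _
  exact Bool.and_comm _ _

-- ===== VERDICT (by name: the statement is the Claim_ definition above) =====
theorem COMMENT_SEARCH_spec : Claim_equal_COMMENT_SEARCH := by
  intro dC lK lKR _
  unfold Spec_COMMENT_SEARCH
  exact COMMENT_SEARCH_eq dC lK lKR
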